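-- pv_equiv track=rewrite | github.com/mircica10/pythonDataStructuresAndAlgorithms | maxNumberFromArrays.py | stack
-- ===== SOURCE A (Python) =====
-- from typing import List
--
-- def stack(a: List[int], k: int) -> List[int]:
--     stack = []
--     remaining = len(a) - k
--     for elem in a:
--         while len(stack) > 0 and remaining > 0 and stack[-1] < elem:
--             stack.pop() # pops the last element in array
--             remaining -= 1
--         stack.append(elem)
--     return stack[:k] # decreasing order array will have stack equal with the original array - no pop() occuring
-- ===== SOURCE B (Python) =====
-- from typing import List
--
-- def stack(a: List[int], k: int) -> List[int]:
--     n = len(a)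
--     if k <= 0:
--         return []
--     if k >= n:
--         return list(a)
--     out = []
--     start = 0
--     for j in range(k):
--         end = n - k + 1 + j
--         window = a[start:end]
--         m = start + window.index(max(window))
--         out.append(a[m])
--         start = m + 1
--     return out
-- ===== Notes on version B (the rewrite author's own statement) =====
-- stated objective: alternative
-- what changed: Replaces the budgeted monotonic-stack single pass with a k-step greedy selection: for each output position scan the feasible window a[start:n-k+1+j] and take its leftmost maximum.
-- outside the precondition, e.g. on stack([3, 1, 2], -1): A returns [3], B returns []
import Mathlib
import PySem

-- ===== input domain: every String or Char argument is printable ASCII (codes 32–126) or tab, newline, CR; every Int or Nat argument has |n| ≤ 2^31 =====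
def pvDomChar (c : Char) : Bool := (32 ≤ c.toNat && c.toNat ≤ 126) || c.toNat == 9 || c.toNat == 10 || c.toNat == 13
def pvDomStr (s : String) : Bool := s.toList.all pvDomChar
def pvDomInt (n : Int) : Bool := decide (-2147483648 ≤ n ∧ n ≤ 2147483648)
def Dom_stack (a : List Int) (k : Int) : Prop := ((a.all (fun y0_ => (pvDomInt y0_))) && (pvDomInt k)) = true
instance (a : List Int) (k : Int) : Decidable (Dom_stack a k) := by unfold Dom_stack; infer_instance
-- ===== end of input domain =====

-- B re-implements the monotonic-stack selection as a k-step greedy scan that picks the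
-- leftmost maximum of each feasible window; equivalence is proved for all k ≥ 0.

-- ===== PORT A =====
-- inner 'while' loop of A: pop from the end while the stack is nonempty, budget remains
-- and the top is smaller than the incoming element
def popWhile (st : List Int) (rem : Int) (e : Int) : List Int × Int :=
  match h : PySem.List.pyGet? st (-1) with      -- stack[-1]; none = empty stack
  | none => (st, rem)
  | some t =>
    if 0 < rem ∧ t < e then popWhile st.dropLast (rem - 1) e
    else (st, rem)
termination_by st.length
decreasing_by
  have hne : st ≠ [] := by intro he; subst he; simp [PySem.List.pyGet?] at h
  have := List.length_pos_iff.mpr hne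
  simp [List.length_dropLast]; omega

-- the 'for elem in a' loop, carrying (stack, remaining)
def stackLoop : List Int → List Int → Int → List Int × Int
  | [], st, rem => (st, rem)
  | e :: rest, st, rem =>
    let p := popWhile st rem e
    stackLoop rest (p.1 ++ [e]) p.2

def stack (a : List Int) (k : Int) : List Int :=
  PySem.List.slice (stackLoop a [] ((a.length : Int) - k)).1 none (some k)

-- ===== PORT B =====
-- one step of B's 'for j in range(k)' loop: state = (out, start)
def stackAltStep (a : List Int) (k : Int) (s : List Int × Int) (j : Int) : List Int × Int :=
  let endI := (a.length : Int) - k + 1 + j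
  let window := PySem.List.slice a (some s.2) (some endI)
  match PySem.List.max? window (fun x => x) with
  | none => s
  | some mx =>
    match PySem.List.index? window mx with
    | none => s
    | some m =>
      let mI := s.2 + (m : Int)
      match PySem.List.pyGet? a mI with
      | none => s
      | some x => (s.1 ++ [x], mI + 1)

def stack_alt (a : List Int) (k : Int) : List Int :=
  if k ≤ 0 then []
  else if (a.length : Int) ≤ k then a
  else ((PySem.List.pyRange 0 k 1).foldl (stackAltStep a k) ([], 0)).1

-- ===== PRECONDITION & SPEC =====
-- Pre_ excludes negative k, outside the function's natural domain ("take k elements"):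
-- there A's interplay of unlimited popping with a negative-end slice is accidental
-- (e.g. a = [3,1,2], k = -1: A returns [3]) while B naturally returns [].
def Pre_stack (a : List Int) (k : Int) : Prop := 0 ≤ k
instance (a : List Int) (k : Int) : Decidable (Pre_stack a k) := by unfold Pre_stack; infer_instance
def pvWitness_stack : List Int × Int := ([2, 1, 3], 2)

def Spec_stack (a : List Int) (k : Int) (out : List Int) : Prop := out = stack_alt a k
instance (a : List Int) (k : Int) (out : List Int) : Decidable (Spec_stack a k out) := by unfold Spec_stack; infer_instance

-- ===== CLAIM (what is proved, stated in full; the proofs are below) =====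
def Claim_equal_stack : Prop := ∀ (a : List Int) (k : Int), Dom_stack a k → Pre_stack a k → Spec_stack a k (stack a k)

-- ===== LEMMAS AND PROOFS =====

theorem popWhile_nonpos (st : List Int) (rem e : Int) (h : rem ≤ 0) :
    popWhile st rem e = (st, rem) := by
  rw [popWhile]
  split
  · rfl
  · next t _ =>
    have hc : ¬ (0 < rem ∧ t < e) := fun hc => absurd hc.1 (by omega)
    rw [if_neg hc]

theorem popWhile_pop {st : List Int} {t rem e : Int}
    (h : PySem.List.pyGet? st (-1) = some t) (hc : 0 < rem ∧ t < e) :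
    popWhile st rem e = popWhile st.dropLast (rem - 1) e := by
  rw [popWhile]
  split
  · next h' => rw [h'] at h; cases h
  · next t' h' =>
    injection h.symm.trans h' with ht
    subst ht
    rw [if_pos hc]

theorem popWhile_stop_none {st : List Int} {rem e : Int}
    (h : PySem.List.pyGet? st (-1) = none) :
    popWhile st rem e = (st, rem) := by
  rw [popWhile]
  split
  · rfl
  · next t' h' => rw [h'] at h; cases h

theorem popWhile_stop {st : List Int} {t rem e : Int}
    (h : PySem.List.pyGet? st (-1) = some t) (hc : ¬ (0 < rem ∧ t < e)) :
    popWhile st rem e = (st, rem) := by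
  rw [popWhile]
  split
  · rfl
  · next t' h' => rw [h'] at h; cases h; rw [if_neg hc]

theorem last_of_pyGet?_neg_one {st : List Int} {t : Int}
    (h : PySem.List.pyGet? st (-1) = some t) : ∃ l', st = l' ++ [t] := by
  rw [PySem.List.pyGet?_neg_one] at h
  exact List.getLast?_eq_some_iff.mp h

theorem popWhile_sumInv (st : List Int) (rem e : Int) :
    (popWhile st rem e).2 - ((popWhile st rem e).1.length : Int) = rem - (st.length : Int) := by
  induction st, rem using popWhile.induct (e := e) with
  | case1 st rem h => rw [popWhile_stop_none h]
  | case2 st rem t h hc ih =>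
    rw [popWhile_pop h hc]
    obtain ⟨l', rfl⟩ := last_of_pyGet?_neg_one h
    simp only [List.dropLast_concat] at ih ⊢
    simp only [List.length_append, List.length_cons, List.length_nil] at *
    push_cast at *
    omega
  | case3 st rem t h hc => rw [popWhile_stop h hc]

theorem popWhile_subset (st : List Int) (rem e : Int) :
    ∀ x ∈ (popWhile st rem e).1, x ∈ st := by
  induction st, rem using popWhile.induct (e := e) with
  | case1 st rem h => rw [popWhile_stop_none h]; exact fun x hx => hx
  | case2 st rem t h hc ih =>
    rw [popWhile_pop h hc]
    obtain ⟨l', rfl⟩ := last_of_pyGet?_neg_one h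
    simp only [List.dropLast_concat] at ih ⊢
    intro x hx
    exact List.mem_append_left _ (ih x hx)
  | case3 st rem t h hc => rw [popWhile_stop h hc]; exact fun x hx => hx

theorem popWhile_all_lt (st : List Int) (rem e : Int) :
    (∀ x ∈ st, x < e) → (st.length : Int) ≤ rem →
    popWhile st rem e = ([], rem - (st.length : Int)) := by
  induction st, rem using popWhile.induct (e := e) with
  | case1 st rem h =>
    intro _ _
    rw [PySem.List.pyGet?_neg_one, List.getLast?_eq_none_iff] at h
    subst h
    rw [popWhile_stop_none (by rw [PySem.List.pyGet?_neg_one]; simp)]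
    simp
  | case2 st rem t h hc ih =>
    intro hlt hrem
    rw [popWhile_pop h hc]
    obtain ⟨l', rfl⟩ := last_of_pyGet?_neg_one h
    simp only [List.dropLast_concat] at ih ⊢
    have hlen : ((l' ++ [t]).length : Int) = (l'.length : Int) + 1 := by
      simp
    rw [ih (fun x hx => hlt x (List.mem_append_left _ hx)) (by simp at hrem; push_cast; omega)]
    simp only [Prod.mk.injEq, true_and]
    simp only [hlen]
    ring
  | case3 st rem t h hc =>
    intro hlt hrem
    obtain ⟨l', rfl⟩ := last_of_pyGet?_neg_one h
    exfalso
    apply hc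
    refine ⟨by simp at hrem; omega, hlt t (by simp)⟩

theorem popWhile_cons_bottom (st : List Int) (rem e : Int) :
    ∀ b, (b < e → rem ≤ (st.length : Int)) →
    popWhile (b :: st) rem e = ((b :: (popWhile st rem e).1), (popWhile st rem e).2) := by
  induction st, rem using popWhile.induct (e := e) with
  | case1 st rem h =>
    intro b hb
    rw [PySem.List.pyGet?_neg_one, List.getLast?_eq_none_iff] at h
    subst h
    rw [popWhile_stop (st := [b]) (t := b) (by rw [PySem.List.pyGet?_neg_one]; simp)
      (fun hcc => by have h2 := hb hcc.2; have h1 := hcc.1; simp at h2; omega)]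
    rw [popWhile_stop_none (st := ([] : List Int)) (by rw [PySem.List.pyGet?_neg_one]; simp)]
  | case2 st rem t h hc ih =>
    intro b hb
    obtain ⟨l', rfl⟩ := last_of_pyGet?_neg_one h
    rw [popWhile_pop h hc, popWhile_pop (st := b :: (l' ++ [t])) (t := t)
      (by rw [PySem.List.pyGet?_neg_one, ← List.cons_append, List.getLast?_concat]) hc]
    rw [← List.cons_append, List.dropLast_concat, List.dropLast_concat]
    simp only [List.dropLast_concat] at ih
    exact ih b (fun hbe => by have := hb hbe; simp at this; push_cast; omega)
  | case3 st rem t h hc =>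
    intro b hb
    obtain ⟨l', rfl⟩ := last_of_pyGet?_neg_one h
    rw [popWhile_stop h hc, popWhile_stop (st := b :: (l' ++ [t])) (t := t)
      (by rw [PySem.List.pyGet?_neg_one, ← List.cons_append, List.getLast?_concat]) hc]

theorem stackLoop_append (p s : List Int) (st : List Int) (rem : Int) :
    stackLoop (p ++ s) st rem = stackLoop s (stackLoop p st rem).1 (stackLoop p st rem).2 := by
  induction p generalizing st rem with
  | nil => rfl
  | cons e rest ih => simp [stackLoop, ih]

theorem stackLoop_nonpos (s : List Int) (st : List Int) (rem : Int) (h : rem ≤ 0) :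
    stackLoop s st rem = (st ++ s, rem) := by
  induction s generalizing st with
  | nil => simp [stackLoop]
  | cons e rest ih =>
    simp [stackLoop, popWhile_nonpos _ _ _ h, ih, List.append_assoc]

theorem stackLoop_sumInv (s : List Int) (st : List Int) (rem : Int) :
    (stackLoop s st rem).2 - ((stackLoop s st rem).1.length : Int)
      = rem - (st.length : Int) - (s.length : Int) := by
  induction s generalizing st rem with
  | nil => simp [stackLoop]
  | cons e rest ih =>
    simp only [stackLoop, ih]
    have := popWhile_sumInv st rem e
    simp [List.length_append]
    omega

theorem stackLoop_subset (s : List Int) (st : List Int) (rem : Int) :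
    ∀ x ∈ (stackLoop s st rem).1, x ∈ st ∨ x ∈ s := by
  induction s generalizing st rem with
  | nil => intro x hx; exact Or.inl hx
  | cons e rest ih =>
    intro x hx
    rcases ih _ _ x hx with h | h
    · rcases List.mem_append.mp h with h | h
      · exact Or.inl (popWhile_subset _ _ _ x h)
      · simp at h; simp [h]
    · simp [h]

theorem stackLoop_bottom (s : List Int) (st : List Int) (rem b : Int)
    (H : ∀ u e v, s = u ++ e :: v → b < e → rem ≤ (st.length : Int) + (u.length : Int)) :
    stackLoop s (b :: st) rem = ((b :: (stackLoop s st rem).1), (stackLoop s st rem).2) := by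
  induction s generalizing st rem with
  | nil => rfl
  | cons e rest ih =>
    simp only [stackLoop]
    rw [popWhile_cons_bottom st rem e b (fun hbe => by
      have := H [] e rest rfl hbe; simpa using this)]
    have hsum := popWhile_sumInv st rem e
    rw [show (b :: (popWhile st rem e).1) ++ [e] = b :: ((popWhile st rem e).1 ++ [e]) by simp]
    exact ih _ _ (fun u f v hs hbf => by
      have := H (e :: u) f v (by simp [hs]) hbf
      simp only [List.length_cons, List.length_append, List.length_nil] at this ⊢
      push_cast at this ⊢
      omega)

-- A's run on p ++ x :: s where x strictly dominates p and no element bigger than x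
-- appears in s early enough to be reachable with the remaining budget
theorem stackA_split (p s : List Int) (x : Int) (k : Int)
    (hk : 0 < k) (hks : k ≤ (s.length : Int) + 1)
    (hp : ∀ y ∈ p, y < x)
    (hbig : ∀ u f v, s = u ++ f :: v → x < f → (s.length : Int) + 1 - k ≤ (u.length : Int)) :
    stack (p ++ x :: s) k = x :: stack s (k - 1) := by
  unfold stack
  rw [stackLoop_append]
  have hsum := stackLoop_sumInv p [] (((p ++ x :: s).length : Int) - k)
  have hlen0 : ((p ++ x :: s).length : Int) = (p.length : Int) + 1 + (s.length : Int) := by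
    simp; push_cast; ring
  have hplt : ∀ y ∈ (stackLoop p [] (((p ++ x :: s).length : Int) - k)).1, y < x := by
    intro y hy
    rcases stackLoop_subset p [] _ y hy with h | h
    · simp at h
    · exact hp y h
  have hP2 : (((stackLoop p [] (((p ++ x :: s).length : Int) - k)).1.length : Int))
      ≤ (stackLoop p [] (((p ++ x :: s).length : Int) - k)).2 := by
    simp only [List.length_nil] at hsum
    omega
  simp only [stackLoop]
  rw [popWhile_all_lt _ _ x hplt hP2]
  have hrem1 : (stackLoop p [] (((p ++ x :: s).length : Int) - k)).2
      - ((stackLoop p [] (((p ++ x :: s).length : Int) - k)).1.length : Int)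
      = (s.length : Int) + 1 - k := by
    simp only [List.length_nil] at hsum
    omega
  rw [hrem1]
  rw [show ([] : List Int) ++ [x] = x :: ([] : List Int) from rfl]
  rw [stackLoop_bottom s [] ((s.length : Int) + 1 - k) x (fun u f v hs hf => by
    simpa using hbig u f v hs hf)]
  rw [show (s.length : Int) - (k - 1) = (s.length : Int) + 1 - k by ring]
  rw [PySem.List.slice_to _ (le_of_lt hk), PySem.List.slice_to _ (by omega : (0:Int) ≤ k - 1)]
  rw [show k.toNat = (k - 1).toNat + 1 by omega, List.take_succ_cons]

-- B is proved equal to A via this recursive greedy description of the selection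
def greedyRec (a : List Int) (k : Int) : List Int :=
  if hk0 : k ≤ 0 then []
  else if hn : (a.length : Int) ≤ k then a
  else
    let window := PySem.List.slice a none (some ((a.length : Int) - k + 1))
    match PySem.List.max? window (fun x => x) with
    | none => []
    | some mx =>
      match PySem.List.index? window mx with
      | none => []
      | some m =>
        match PySem.List.pyGet? a (m : Int) with
        | none => []
        | some x => x :: greedyRec (PySem.List.slice a (some ((m : Int) + 1)) none) (k - 1)
termination_by a.length
decreasing_by
  have h1 : ((m : Int) + 1) = ((m + 1 : Nat) : Int) := by push_cast; ring
  rw [h1, PySem.List.slice_from_natCast]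
  have : 0 < a.length := by omega
  simp [List.length_drop]; omega


theorem stack_eq_greedy (N : ℕ) : ∀ (a : List Int) (k : Int), a.length ≤ N → 0 ≤ k →
    stack a k = greedyRec a k := by
  induction N with
  | zero =>
    intro a k hN hk
    have ha : a = [] := List.length_eq_zero_iff.mp (Nat.le_zero.mp hN)
    subst ha
    rw [greedyRec]
    unfold stack
    simp only [stackLoop]
    rw [PySem.List.slice_to _ hk]
    by_cases hk0 : k ≤ 0
    · rw [dif_pos hk0]; simp
    · rw [dif_neg hk0, dif_pos (by simp; omega)]; simp
  | succ N ih =>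
    intro a k hN hk
    rw [greedyRec]
    by_cases hk0 : k ≤ 0
    · rw [dif_pos hk0]
      have hkz : k = 0 := le_antisymm hk0 hk
      subst hkz
      unfold stack
      rw [PySem.List.slice_to _ le_rfl]
      simp
    · rw [dif_neg hk0]
      by_cases hn : (a.length : Int) ≤ k
      · rw [dif_pos hn]
        unfold stack
        rw [stackLoop_nonpos a [] _ (by omega), PySem.List.slice_to _ hk]
        simp only [List.nil_append]
        exact List.take_of_length_le (by omega)
      · rw [dif_neg hn]
        have hw : (0:Int) ≤ (a.length : Int) - k + 1 := by omega
        simp only [PySem.List.slice_to _ hw]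
        set c : ℕ := ((a.length : Int) - k + 1).toNat with hc
        have hcI : (c : Int) = (a.length : Int) - k + 1 := Int.toNat_of_nonneg hw
        have hcn : c ≤ a.length := by omega
        have hwlen : (a.take c).length = c := by rw [List.length_take]; omega
        obtain ⟨mx, hmax⟩ : ∃ mx, PySem.List.max? (a.take c) (fun x => x) = some mx := by
          cases h : PySem.List.max? (a.take c) (fun x => x) with
          | none =>
            exfalso
            have h0 := (PySem.List.max?_eq_none_iff _ _).mp h
            have h1 : (a.take c).length = 0 := by rw [h0]; rfl
            omega
          | some mx => exact ⟨mx, rfl⟩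
        simp only [hmax]
        obtain ⟨m, hidx⟩ : ∃ m, PySem.List.index? (a.take c) mx = some m := by
          cases h : PySem.List.index? (a.take c) mx with
          | none =>
            exact absurd (PySem.List.max?_mem hmax) ((PySem.List.index?_eq_none_iff _ _).mp h)
          | some m => exact ⟨m, rfl⟩
        simp only [hidx]
        obtain ⟨hm, hwm, hprev⟩ := PySem.List.getElem_of_index?_eq_some hidx
        have hmc : m < c := hwlen ▸ hm
        have hmn : m < a.length := by omega
        have hmx : mx = a[m] := by rw [← hwm]; exact List.getElem_take
        simp only [PySem.List.pyGet?_natCast, List.getElem?_eq_getElem hmn]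
        have hcast : ((m : Int) + 1) = (((m + 1 : ℕ)) : Int) := by push_cast; ring
        rw [hcast, PySem.List.slice_from_natCast]
        have hslen : (a.drop (m+1)).length = a.length - (m+1) := by simp
        rw [← ih (a.drop (m+1)) (k-1) (by omega) (by omega)]
        have hdecomp : a.take m ++ a[m] :: a.drop (m+1) = a := by
          rw [← List.drop_eq_getElem_cons hmn, List.take_append_drop]
        have hp : ∀ y ∈ a.take m, y < a[m] := by
          intro y hy
          obtain ⟨j, hj, rfl⟩ := List.getElem_of_mem hy
          have hjm : j < m := by rw [List.length_take] at hj; omega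
          have hjc : j < (a.take c).length := by omega
          have hle : (a.take c)[j]'hjc ≤ mx := by
            have := PySem.List.max?_isMax hmax ((a.take c)[j]'hjc) (List.getElem_mem hjc)
            simpa using this
          have hne : (a.take c)[j]'hjc ≠ mx := hprev j hjm
          have h2 : (a.take c)[j]'hjc = a[j]'(by omega) := List.getElem_take
          have h1 : (a.take m)[j]'hj = a[j]'(by omega) := List.getElem_take
          rw [h1, ← hmx]
          rw [h2] at hle hne
          exact lt_of_le_of_ne hle hne
        have hbig : ∀ u f v, a.drop (m+1) = u ++ f :: v → a[m] < f →
            ((a.drop (m+1)).length : Int) + 1 - k ≤ (u.length : Int) := by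
          intro u f v hs hf
          by_contra hcon
          push Not at hcon
          have hidxlt : m + 1 + u.length < c := by
            rw [hslen] at hcon
            omega
          have hub : u.length < (a.drop (m+1)).length := by rw [hs]; simp
          have h5 : (a.drop (m+1))[u.length]? = some f := by
            rw [hs, ← PySem.List.pyGet?_natCast, PySem.List.pyGet?_append_length]
          have h6 : (a.drop (m+1))[u.length]'hub = f := by
            rw [List.getElem?_eq_getElem hub] at h5
            injection h5
          have h7 : (a.drop (m+1))[u.length]'hub = a[m + 1 + u.length]'(by omega) :=
            List.getElem_drop
          have hidxc : m + 1 + u.length < (a.take c).length := by omega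
          have h8 : (a.take c)[m + 1 + u.length]'hidxc ≤ mx := by
            have := PySem.List.max?_isMax hmax ((a.take c)[m + 1 + u.length]'hidxc)
              (List.getElem_mem hidxc)
            simpa using this
          have h9 : (a.take c)[m + 1 + u.length]'hidxc = a[m + 1 + u.length]'(by omega) :=
            List.getElem_take
          rw [h9, ← h7, h6, hmx] at h8
          omega
        have hsplit := stackA_split (a.take m) (a.drop (m+1)) (a[m]) k (by omega)
          (by rw [hslen]; push_cast; omega) hp hbig
        rw [hdecomp] at hsplit
        exact hsplit

theorem greedyRec_step (b : List Int) (k' : Int) (h1 : 0 < k') (h2 : k' < (b.length : Int))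
    {mx : Int} {m : Nat}
    (hmax : PySem.List.max? (b.take (((b.length : Int) - k' + 1).toNat)) (fun x => x) = some mx)
    (hidx : PySem.List.index? (b.take (((b.length : Int) - k' + 1).toNat)) mx = some m)
    (hmn : m < b.length) :
    greedyRec b k' = b[m] :: greedyRec (b.drop (m + 1)) (k' - 1) := by
  rw [greedyRec, dif_neg (by omega : ¬ k' ≤ 0), dif_neg (by omega : ¬ (b.length : Int) ≤ k')]
  rw [PySem.List.slice_to _ (by omega : (0:Int) ≤ (b.length : Int) - k' + 1)]
  simp only [hmax, hidx, PySem.List.pyGet?_natCast, List.getElem?_eq_getElem hmn]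
  rw [show ((m : Int) + 1) = (((m + 1 : Nat)) : Int) by push_cast; ring,
    PySem.List.slice_from_natCast]

theorem greedyRec_all (b : List Int) (k' : Int) (h1 : 0 ≤ k') (h2 : (b.length : Int) ≤ k') :
    greedyRec b k' = b := by
  by_cases hz : k' ≤ 0
  · rw [greedyRec, dif_pos hz]
    have : b.length = 0 := by omega
    exact (List.length_eq_zero_iff.mp this).symm
  · rw [greedyRec, dif_neg hz, dif_pos h2]

theorem exists_max_index (b : List Int) (c : Nat) (hc1 : 1 ≤ c) (hcn : c ≤ b.length) :
    ∃ mx m, PySem.List.max? (b.take c) (fun x => x) = some mx ∧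
      PySem.List.index? (b.take c) mx = some m ∧ m < c := by
  have hwlen : (b.take c).length = c := by rw [List.length_take]; omega
  obtain ⟨mx, hmax⟩ : ∃ mx, PySem.List.max? (b.take c) (fun x => x) = some mx := by
    cases h : PySem.List.max? (b.take c) (fun x => x) with
    | none =>
      exfalso
      have h0 := (PySem.List.max?_eq_none_iff _ _).mp h
      have h1 : (b.take c).length = 0 := by rw [h0]; rfl
      omega
    | some mx => exact ⟨mx, rfl⟩
  obtain ⟨m, hidx⟩ : ∃ m, PySem.List.index? (b.take c) mx = some m := by
    cases h : PySem.List.index? (b.take c) mx with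
    | none => exact absurd (PySem.List.max?_mem hmax) ((PySem.List.index?_eq_none_iff _ _).mp h)
    | some m => exact ⟨m, rfl⟩
  obtain ⟨hm, -, -⟩ := PySem.List.getElem_of_index?_eq_some hidx
  exact ⟨mx, m, hmax, hidx, hwlen ▸ hm⟩

theorem foldG (a : List Int) (k : Int) (hkn : k ≤ (a.length : Int)) :
    ∀ (cnt : Nat) (j0 : Int) (start : Nat) (acc : List Int),
    j0 + (cnt : Int) = k → 0 ≤ j0 →
    (start : Int) ≤ (a.length : Int) - k + j0 →
    ((PySem.List.pyRange j0 k 1).foldl (stackAltStep a k) (acc, (start : Int))).1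
      = acc ++ greedyRec (a.drop start) (k - j0) := by
  intro cnt
  induction cnt with
  | zero =>
    intro j0 start acc hj0 hj0n hstart
    have hj0k : j0 = k := by push_cast at hj0; omega
    subst hj0k
    rw [show PySem.List.pyRange j0 j0 1 = [] by simp [PySem.List.pyRange]]
    rw [greedyRec, dif_pos (by omega : j0 - j0 ≤ 0)]
    simp [List.foldl]
  | succ cnt ih =>
    intro j0 start acc hj0 hj0n hstart
    have hj0k : j0 < k := by push_cast at hj0; omega
    rw [PySem.List.pyRange_one_cons hj0k, List.foldl_cons]
    have hlenb : ((a.drop start).length : Int) = (a.length : Int) - (start : Int) := by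
      simp [List.length_drop]; omega
    have hendI : (0:Int) ≤ (a.length : Int) - k + 1 + j0 := by omega
    have hwin : PySem.List.slice a (some (start : Int)) (some ((a.length : Int) - k + 1 + j0))
        = (a.drop start).take ((((a.drop start).length : Int) - (k - j0) + 1).toNat) := by
      rw [PySem.List.slice_toNat _ (by omega) hendI]
      congr 1
      omega
    by_cases hmin : (a.length : Int) - (start : Int) ≤ k - j0
    · have hmin' : (a.length : Int) - (start : Int) = k - j0 := by omega
      obtain ⟨hd, tl, hb⟩ : ∃ hd tl, a.drop start = hd :: tl := by
        cases hcb : a.drop start with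
        | nil =>
          exfalso
          have := congrArg List.length hcb
          simp [List.length_drop] at this
          omega
        | cons hd tl => exact ⟨hd, tl, rfl⟩
      have hc1 : ((((a.drop start).length : Int) - (k - j0) + 1).toNat) = 1 := by omega
      rw [hb] at hc1
      have hstep : stackAltStep a k (acc, (start : Int)) j0
          = (acc ++ [hd], (start : Int) + 1) := by
        unfold stackAltStep
        simp only [hwin, hb, hc1, List.take_succ_cons, List.take_zero]
        rw [show PySem.List.max? [hd] (fun x => x) = some hd from rfl]
        have hsa : a[start]? = some hd := by
          have h0 : (a.drop start)[0]? = some hd := by rw [hb]; rfl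
          rwa [List.getElem?_drop, Nat.add_zero] at h0
        simp [PySem.List.pyGet?_natCast, hsa]
      rw [hstep]
      have hrec := ih (j0 + 1) (start + 1) (acc ++ [hd]) (by push_cast at hj0 ⊢; omega)
        (by omega) (by push_cast; omega)
      rw [show ((start : Int) + 1) = (((start + 1 : Nat)) : Int) by push_cast; ring]
      rw [hrec]
      rw [greedyRec_all (a.drop (start + 1)) (k - (j0 + 1)) (by omega)
        (by simp [List.length_drop]; omega)]
      rw [greedyRec_all (a.drop start) (k - j0) (by omega) (by rw [hlenb]; omega)]
      rw [hb, show a.drop (start + 1) = tl by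
        have h2 := congrArg List.tail hb
        simpa [List.tail_drop] using h2]
      simp
    · set b := a.drop start with hbdef
      set c : Nat := (((b.length : Int)) - (k - j0) + 1).toNat with hcdef
      have hcI : (c : Int) = (b.length : Int) - (k - j0) + 1 := by
        rw [hcdef]
        rw [Int.toNat_of_nonneg (by omega)]
      have hc1 : 1 ≤ c := by omega
      have hcn : c ≤ b.length := by omega
      obtain ⟨mx, m, hmax, hidx, hmc⟩ := exists_max_index b c hc1 hcn
      have hmb : m < b.length := by omega
      have hstep : stackAltStep a k (acc, (start : Int)) j0
          = (acc ++ [b[m]], ((start : Int) + (m : Int)) + 1) := by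
        unfold stackAltStep
        simp only [hwin, hmax, hidx]
        have hcast : (start : Int) + (m : Int) = (((start + m : Nat)) : Int) := by push_cast; ring
        simp only [hcast, PySem.List.pyGet?_natCast]
        have hmlt : start + m < a.length := by
          have hbl : b.length = a.length - start := by rw [hbdef]; simp
          omega
        have hsa : a[start + m]? = some b[m] := by
          rw [List.getElem?_eq_getElem hmlt]
          exact congrArg some (List.getElem_drop).symm
        rw [hsa]
      rw [hstep]
      have hrec := ih (j0 + 1) (start + m + 1) (acc ++ [b[m]])
        (by push_cast at hj0 ⊢; omega) (by omega) (by push_cast; omega)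
      rw [show ((start : Int) + (m : Int)) + 1 = (((start + m + 1 : Nat)) : Int) by push_cast; ring]
      rw [hrec]
      rw [greedyRec_step b (k - j0) (by omega) (by omega) hmax hidx hmb]
      rw [show a.drop (start + m + 1) = b.drop (m + 1) by
        rw [hbdef, List.drop_drop]; try congr 1; try omega]
      rw [show k - j0 - 1 = k - (j0 + 1) by ring]
      simp

theorem greedy_eq_alt (a : List Int) (k : Int) (hk : 0 ≤ k) :
    greedyRec a k = stack_alt a k := by
  rw [stack_alt]
  by_cases hk0 : k ≤ 0
  · rw [if_pos hk0, greedyRec, dif_pos hk0]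
  · rw [if_neg hk0]
    by_cases hn : (a.length : Int) ≤ k
    · rw [if_pos hn, greedyRec, dif_neg hk0, dif_pos hn]
    · rw [if_neg hn]
      have h := foldG a k (by omega) k.toNat 0 0 []
        (by simp; omega) le_rfl (by simp; omega)
      simp only [Nat.cast_zero] at h
      rw [h]
      simp


-- ===== VERDICT (by name: the statement is the Claim_ definition above) =====
theorem stack_spec : Claim_equal_stack := by
  intro a k _ hk
  unfold Spec_stack
  rw [stack_eq_greedy a.length a k le_rfl hk]
  exact greedy_eq_alt a k hk
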